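-- pv_equiv track=rewrite | github.com/afrojuju1/spreads | src/spreads/services/option_structures.py | primary_short_long_symbols
-- ===== SOURCE A (Python) =====
-- from collections.abc import Mapping
-- from typing import Any
--
-- def _as_text(value: Any) -> str | None:
--     if value is None:
--         return None
--     rendered = str(value).strip()
--     return rendered or None
--
-- def leg_role(*, side: Any, position_intent: Any) -> str | None:
--     intent = str(position_intent or "").strip().lower()
--     if intent in {"sell_to_open", "buy_to_close"}:
--         return "short"
--     if intent in {"buy_to_open", "sell_to_close"}:
--         return "long"
--     normalized_side = str(side or "").strip().lower()
--     if normalized_side == "sell":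
--         return "short"
--     if normalized_side == "buy":
--         return "long"
--     return None
--
-- def primary_short_long_symbols(
--     legs: list[Mapping[str, Any]],
-- ) -> tuple[str | None, str | None]:
--     short_symbol = None
--     long_symbol = None
--     for leg in legs:
--         symbol = _as_text(leg.get("symbol"))
--         role = _as_text(leg.get("role")) or leg_role(
--             side=leg.get("side"),
--             position_intent=leg.get("position_intent"),
--         )
--         if symbol is None or role is None:
--             continue
--         if role == "short" and short_symbol is None:
--             short_symbol = symbol
--         elif role == "long" and long_symbol is None:
--             long_symbol = symbol
--     return short_symbol, long_symbol
-- ===== SOURCE B (Python) =====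
-- from collections.abc import Mapping
-- from typing import Any
--
-- _INTENT_ROLE = {
--     "sell_to_open": "short",
--     "buy_to_close": "short",
--     "buy_to_open": "long",
--     "sell_to_close": "long",
-- }
-- _SIDE_ROLE = {"sell": "short", "buy": "long"}
--
--
-- def _classify(leg: Mapping[str, Any]) -> tuple[str, str] | None:
--     raw_sym = leg.get("symbol")
--     sym = None if raw_sym is None else (str(raw_sym).strip() or None)
--     raw_role = leg.get("role")
--     role = None if raw_role is None else (str(raw_role).strip() or None)
--     if role is None:
--         role = _INTENT_ROLE.get(str(leg.get("position_intent") or "").strip().lower())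
--     if role is None:
--         role = _SIDE_ROLE.get(str(leg.get("side") or "").strip().lower())
--     if sym is None or role is None:
--         return None
--     return role, sym
--
--
-- def primary_short_long_symbols(
--     legs: list[Mapping[str, Any]],
-- ) -> tuple[str | None, str | None]:
--     short_symbol = None
--     long_symbol = None
--     for leg in reversed(legs):
--         pair = _classify(leg)
--         if pair is None:
--             continue
--         role, sym = pair
--         if role == "short":
--             short_symbol = sym
--         elif role == "long":
--             long_symbol = sym
--     return short_symbol, long_symbol
-- ===== Notes on version B (the rewrite author's own statement) =====
-- stated objective: alternative
-- what changed: Replaces the forward fill-if-empty loop with helper calls by a back-to-front overwrite scan over reversed(legs) whose role logic is two lookup tables instead of the if-chain of leg_role and _as_text.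
import Mathlib
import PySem

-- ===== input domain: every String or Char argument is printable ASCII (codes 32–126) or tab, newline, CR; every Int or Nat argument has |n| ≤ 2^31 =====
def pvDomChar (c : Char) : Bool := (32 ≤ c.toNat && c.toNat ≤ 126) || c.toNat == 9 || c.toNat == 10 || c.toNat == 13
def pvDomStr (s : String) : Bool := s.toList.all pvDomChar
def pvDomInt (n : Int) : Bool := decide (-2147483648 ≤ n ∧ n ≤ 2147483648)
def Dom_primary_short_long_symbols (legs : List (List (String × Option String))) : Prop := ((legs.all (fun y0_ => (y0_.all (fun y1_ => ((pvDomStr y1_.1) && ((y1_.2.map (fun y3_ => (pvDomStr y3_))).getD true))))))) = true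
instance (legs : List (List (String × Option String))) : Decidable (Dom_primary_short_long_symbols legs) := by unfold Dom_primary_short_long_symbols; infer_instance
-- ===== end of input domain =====

-- B replaces A's forward fill-if-empty loop with a back-to-front overwrite scan over
-- reversed(legs), with the role logic expressed as two lookup tables (objective: alternative).


-- ===== PORT A =====
-- _as_text: None → None; else strip, empty → None  (values here are str | None, so str(value) = value)
def asText (value : Option String) : Option String :=
  match value with
  | none => none
  | some s =>
    let rendered := PySem.Str.strip s
    if rendered = "" then none else some rendered

-- leg_role(side=…, position_intent=…)
def legRole (side : Option String) (position_intent : Option String) : Option String :=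
  let intent := PySem.Str.lower (PySem.Str.strip (position_intent.getD ""))
  if intent = "sell_to_open" ∨ intent = "buy_to_close" then some "short"
  else if intent = "buy_to_open" ∨ intent = "sell_to_close" then some "long"
  else
    let normalized_side := PySem.Str.lower (PySem.Str.strip (side.getD ""))
    if normalized_side = "sell" then some "short"
    else if normalized_side = "buy" then some "long"
    else none

-- the loop body of A, state = (short_symbol, long_symbol)
def legStepA (acc : Option String × Option String) (leg : List (String × Option String)) :
    Option String × Option String :=
  let symbol := asText (((PySem.Dict.mk leg).get? "symbol").join)
  let role := (asText (((PySem.Dict.mk leg).get? "role").join)).orElse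
      (fun _ => legRole (((PySem.Dict.mk leg).get? "side").join) (((PySem.Dict.mk leg).get? "position_intent").join))
  match symbol, role with
  | some s, some r =>
    if r = "short" ∧ acc.1 = none then (some s, acc.2)
    else if r = "long" ∧ acc.2 = none then (acc.1, some s)
    else acc
  | _, _ => acc

def primary_short_long_symbols (legs : List (List (String × Option String))) : Option String × Option String :=
  legs.foldl legStepA (none, none)

-- ===== PORT B =====
-- the two role tables of Source B
def intentRoleTable : PySem.Dict String String :=
  PySem.Dict.mk [("sell_to_open", "short"), ("buy_to_close", "short"),
                 ("buy_to_open", "long"), ("sell_to_close", "long")]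

def sideRoleTable : PySem.Dict String String :=
  PySem.Dict.mk [("sell", "short"), ("buy", "long")]

-- 'str(x).strip() or None' written as a bind target
def stripOrNone (s : String) : Option String :=
  let t := PySem.Str.strip s
  if t = "" then none else some t

-- _classify(leg): (role, symbol) pair, or None when either is missing
def classifyLeg (leg : List (String × Option String)) : Option (String × String) :=
  let d := PySem.Dict.mk leg
  let sym := (d.get? "symbol").join.bind stripOrNone
  let role0 := (d.get? "role").join.bind stripOrNone
  let role1 :=
    match role0 with
    | some r => some r
    | none => intentRoleTable.get? (PySem.Str.lower (PySem.Str.strip (((d.get? "position_intent").join).getD "")))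
  let role :=
    match role1 with
    | some r => some r
    | none => sideRoleTable.get? (PySem.Str.lower (PySem.Str.strip (((d.get? "side").join).getD "")))
  match sym, role with
  | some s, some r => some (r, s)
  | _, _ => none

-- the overwrite loop body of Source B (runs over reversed(legs): later writes win = earlier legs win)
def legStepB (acc : Option String × Option String) (leg : List (String × Option String)) :
    Option String × Option String :=
  match classifyLeg leg with
  | none => acc
  | some (r, s) =>
    if r = "short" then (some s, acc.2)
    else if r = "long" then (acc.1, some s)
    else acc

def primary_short_long_symbols_alt (legs : List (List (String × Option String))) : Option String × Option String :=
  legs.reverse.foldl legStepB (none, none)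

-- ===== PRECONDITION & SPEC =====
def Spec_primary_short_long_symbols (legs : List (List (String × Option String))) (out : Option String × Option String) : Prop := out = primary_short_long_symbols_alt legs
instance (legs : List (List (String × Option String))) (out : Option String × Option String) : Decidable (Spec_primary_short_long_symbols legs out) := by unfold Spec_primary_short_long_symbols; infer_instance

-- ===== CLAIM =====
def Claim_equal_primary_short_long_symbols : Prop := ∀ (legs : List (List (String × Option String))), Dom_primary_short_long_symbols legs → Spec_primary_short_long_symbols legs (primary_short_long_symbols legs)

-- ===== LEMMAS AND PROOFS =====

-- proof-only helper: the first symbol whose classified role is `target`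
def firstSym (legs : List (List (String × Option String))) (target : String) : Option String :=
  legs.findSome? (fun leg =>
    match classifyLeg leg with
    | some (r, s) => if r = target then some s else none
    | none => none)

-- the table lookups agree with leg_role's if-chain
theorem tables_eq_legRole (side intent : Option String) :
    (match intentRoleTable.get? (PySem.Str.lower (PySem.Str.strip (intent.getD ""))) with
     | some r => some r
     | none => sideRoleTable.get? (PySem.Str.lower (PySem.Str.strip (side.getD "")))) =
    legRole side intent := by
  simp only [legRole, intentRoleTable, sideRoleTable, PySem.Dict.get?_mk_cons, beq_iff_eq]
  generalize (PySem.Str.lower (PySem.Str.strip (intent.getD ""))) = i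
  generalize (PySem.Str.lower (PySem.Str.strip (side.getD ""))) = n
  simp only [@eq_comm String "sell_to_open" i, @eq_comm String "buy_to_close" i,
    @eq_comm String "buy_to_open" i, @eq_comm String "sell_to_close" i,
    @eq_comm String "sell" n, @eq_comm String "buy" n]
  by_cases h1 : i = "sell_to_open" <;> by_cases h2 : i = "buy_to_close" <;>
    by_cases h3 : i = "buy_to_open" <;> by_cases h4 : i = "sell_to_close" <;>
    by_cases h5 : n = "sell" <;> by_cases h6 : n = "buy" <;>
    simp_all [PySem.Dict.get?]

-- classifyLeg computes exactly the (role, symbol) pair of A's loop body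
theorem classifyLeg_eq (leg : List (String × Option String)) :
    classifyLeg leg =
      match asText (((PySem.Dict.mk leg).get? "symbol").join),
            (asText (((PySem.Dict.mk leg).get? "role").join)).orElse
              (fun _ => legRole (((PySem.Dict.mk leg).get? "side").join)
                (((PySem.Dict.mk leg).get? "position_intent").join)) with
      | some s, some r => some (r, s)
      | _, _ => none := by
  have hbind : ∀ v : Option String, v.bind stripOrNone = asText v := by
    intro v; cases v <;> rfl
  simp only [classifyLeg, hbind]
  rcases h0 : asText (((PySem.Dict.mk leg).get? "role").join) with _ | r
  · simp only [Option.orElse]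
    rw [tables_eq_legRole]
  · rfl

-- A's forward fill-if-empty loop from (a, b) ends in the two first-match scans, each masked by the filled slot
theorem foldl_legStepA (legs : List (List (String × Option String))) (a b : Option String) :
    legs.foldl legStepA (a, b) =
      (a.orElse (fun _ => firstSym legs "short"), b.orElse (fun _ => firstSym legs "long")) := by
  induction legs generalizing a b with
  | nil => simp [firstSym]
  | cons leg rest ih =>
    simp only [List.foldl_cons, firstSym, List.findSome?_cons]
    have hstep : legStepA (a, b) leg =
        match classifyLeg leg with
        | some (r, s) =>
          if r = "short" ∧ a = none then (some s, b)
          else if r = "long" ∧ b = none then (a, some s)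
          else (a, b)
        | none => (a, b) := by
      rw [classifyLeg_eq]
      simp only [legStepA]
      rcases asText (((PySem.Dict.mk leg).get? "symbol").join) with _ | s <;>
        rcases (asText (((PySem.Dict.mk leg).get? "role").join)).orElse
          (fun _ => legRole (((PySem.Dict.mk leg).get? "side").join)
            (((PySem.Dict.mk leg).get? "position_intent").join)) with _ | r <;> rfl
    rw [hstep]
    rcases hrs : classifyLeg leg with _ | ⟨r, s⟩
    · simpa [firstSym] using ih a b
    · by_cases hs : r = "short"
      · subst hs
        rcases a with _ | av <;> simp [ih, firstSym]
      · by_cases hl : r = "long"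
        · subst hl
          rcases b with _ | bv <;> simp [hs, ih, firstSym]
        · simp [hs, hl, ih, firstSym]

-- B's reversed overwrite loop also computes the two first-match scans
theorem foldl_legStepB (legs : List (List (String × Option String))) :
    legs.reverse.foldl legStepB (none, none) =
      (firstSym legs "short", firstSym legs "long") := by
  induction legs with
  | nil => simp [firstSym]
  | cons leg rest ih =>
    simp only [List.reverse_cons, List.foldl_append, List.foldl_cons, List.foldl_nil, ih]
    simp only [firstSym, List.findSome?_cons, legStepB]
    rcases hrs : classifyLeg leg with _ | ⟨r, s⟩
    · rfl
    · by_cases hs : r = "short"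
      · simp [hs]
      · by_cases hl : r = "long" <;> simp [hs, hl]

-- ===== VERDICT =====
theorem primary_short_long_symbols_spec : Claim_equal_primary_short_long_symbols := by
  intro legs _
  show primary_short_long_symbols legs = primary_short_long_symbols_alt legs
  rw [primary_short_long_symbols, primary_short_long_symbols_alt, foldl_legStepA, foldl_legStepB]
  rfl
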